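-- pv_equiv track=rewrite | github.com/ascheppach/job_resume_tool | src/backend/AssignCluster/control/helper_functions/helper_clustering.py | cluster_overlapping_strings
-- ===== SOURCE A (Python) =====
-- def cluster_overlapping_strings(string_list):
--     clusters = []
--     while string_list:
--         current_string = string_list.pop(0)
--         current_cluster = [current_string]
--         overlapping_strings = set(current_string.split())
--         i = 0
--         while i < len(string_list):
--             if any(word in overlapping_strings for word in string_list[i].split()):
--                 current_cluster.append(string_list.pop(i))
--             else:
--                 i += 1
--         clusters.append(current_cluster)
--     return clusters
-- ===== SOURCE B (Python) =====
-- # Inverted word->index map built once; per seed, the matched index set is the union of its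
-- # words' posting lists, so the overlap test needs no word comparisons.
-- # Note: A empties its argument list in place; B does not mutate it (return values agree).
-- def cluster_overlapping_strings(string_list):
--     index = {}
--     items = []
--     for i, s in enumerate(string_list):
--         ws = set(s.split())
--         items.append((i, s, ws))
--         for w in ws:
--             index.setdefault(w, []).append(i)
--     clusters = []
--     remaining = items
--     while remaining:
--         (i, s, ws) = remaining[0]
--         matched = set()
--         for w in ws:
--             matched.update(index[w])
--         cluster = [s] + [t for (j, t, _) in remaining[1:] if j in matched]
--         remaining = [(j, t, wt) for (j, t, wt) in remaining[1:] if j not in matched]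
--         clusters.append(cluster)
--     return clusters
-- ===== Notes on version B (the rewrite author's own statement) =====
-- stated objective: faster
-- what changed: B builds an inverted word-to-index map and the item word sets once, then for each seed gathers the matched index set as the union of its words' posting lists, replacing A's per-seed re-splitting and word-by-word membership scans of every remaining string.
import Mathlib
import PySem

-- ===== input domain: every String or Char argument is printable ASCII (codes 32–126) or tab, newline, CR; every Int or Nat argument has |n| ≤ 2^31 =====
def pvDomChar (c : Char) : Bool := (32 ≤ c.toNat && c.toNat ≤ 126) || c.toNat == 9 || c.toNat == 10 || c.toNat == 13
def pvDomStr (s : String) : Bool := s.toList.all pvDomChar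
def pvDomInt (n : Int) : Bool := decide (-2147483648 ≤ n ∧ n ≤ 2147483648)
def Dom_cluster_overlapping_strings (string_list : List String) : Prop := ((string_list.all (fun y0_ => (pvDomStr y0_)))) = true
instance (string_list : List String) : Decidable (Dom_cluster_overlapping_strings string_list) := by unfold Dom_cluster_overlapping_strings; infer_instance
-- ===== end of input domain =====

-- B replaces A's per-seed word-by-word overlap scans by an inverted word→index map built once
-- (objective: faster). A empties its argument list in place; B does not mutate it — the
-- equivalence proved here is about the return value.

-- ===== PORT A =====
-- inner while loop of A: scans string_list left to right, popping matching strings into the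
-- cluster (first component) and keeping the rest in order (second component)
def clusterInner (ov : PySem.Set String) : List String → List String × List String
  | [] => ([], [])
  | s :: rest =>
    let pr := clusterInner ov rest
    if (PySem.Str.split₀ s).any (fun w => PySem.Set.contains ov w) then
      (s :: pr.1, pr.2)
    else
      (pr.1, s :: pr.2)

-- termination measure for the outer while loop (the leftover list is no longer than the input)
theorem clusterInner_snd_length (ov : PySem.Set String) (l : List String) :
    (clusterInner ov l).2.length ≤ l.length := by
  induction l with
  | nil => simp [clusterInner]
  | cons s rest ih =>
    simp only [clusterInner]
    split <;> simp <;> omega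

def cluster_overlapping_strings (string_list : List String) : List (List String) :=
  match string_list with
  | [] => []
  | s :: rest =>
    let ov := PySem.Set.ofList (PySem.Str.split₀ s)
    let pr := clusterInner ov rest
    (s :: pr.1) :: cluster_overlapping_strings pr.2
termination_by string_list.length
decreasing_by
  have := clusterInner_snd_length (PySem.Set.ofList (PySem.Str.split₀ s)) rest
  simp; omega

-- ===== PORT B =====
-- index.setdefault(w, []).append(i) for every word w of the item's word set
def buildIndexInner (i : Int) (ws : PySem.Set String) (d : PySem.Dict String (List Int)) :
    PySem.Dict String (List Int) :=
  ws.foldl (fun d w => d.insert w (d.getD w [] ++ [i])) d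

-- first for-loop of B: builds (inverted index, items = [(i, s, set(s.split())), …])
def buildB (string_list : List String) :
    PySem.Dict String (List Int) × List (Int × String × PySem.Set String) :=
  (PySem.List.enumerate string_list).foldl
    (fun st p =>
      let ws := PySem.Set.ofList (PySem.Str.split₀ p.2)
      (buildIndexInner p.1 ws st.1, st.2 ++ [(p.1, p.2, ws)]))
    (PySem.Dict.empty, [])

-- matched = union of the posting lists of the seed's words (index[w] is always present,
-- it was built from the same word set, so the getD default is never used)
def gatherMatched (idx : PySem.Dict String (List Int)) (ws : PySem.Set String) : PySem.Set Int :=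
  ws.foldl (fun m w => PySem.Set.update m (idx.getD w [])) PySem.Set.empty

-- while loop of B over the remaining items
def clusterLoop (idx : PySem.Dict String (List Int))
    (remaining : List (Int × String × PySem.Set String)) : List (List String) :=
  match remaining with
  | [] => []
  | (_, s, ws) :: rest =>
    let matched := gatherMatched idx ws
    (s :: (rest.filter (fun t => PySem.Set.contains matched t.1)).map (fun t => t.2.1))
      :: clusterLoop idx (rest.filter (fun t => !PySem.Set.contains matched t.1))
termination_by remaining.length
decreasing_by
  simp only [List.length_unattach, List.length_cons]
  exact Nat.lt_succ_of_le ((List.length_filter_le _ _).trans (List.length_attach (l := rest)).le)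

def cluster_overlapping_strings_alt (string_list : List String) : List (List String) :=
  let st := buildB string_list
  clusterLoop st.1 st.2

-- ===== PRECONDITION & SPEC =====
def Spec_cluster_overlapping_strings (string_list : List String) (out : List (List String)) : Prop := out = cluster_overlapping_strings_alt string_list
instance (string_list : List String) (out : List (List String)) : Decidable (Spec_cluster_overlapping_strings string_list out) := by unfold Spec_cluster_overlapping_strings; infer_instance

-- ===== CLAIM (what is proved, stated in full; the proofs are below) =====
def Claim_equal_cluster_overlapping_strings : Prop := ∀ (string_list : List String), Dom_cluster_overlapping_strings string_list → Spec_cluster_overlapping_strings string_list (cluster_overlapping_strings string_list)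

-- ===== LEMMAS AND PROOFS =====

-- unfolding equations for A's well-founded outer loop
theorem A_nil : cluster_overlapping_strings [] = [] := by
  rw [cluster_overlapping_strings.eq_def]

theorem A_cons (s : String) (rest : List String) :
    cluster_overlapping_strings (s :: rest) =
      (s :: (clusterInner (PySem.Set.ofList (PySem.Str.split₀ s)) rest).1)
        :: cluster_overlapping_strings
             (clusterInner (PySem.Set.ofList (PySem.Str.split₀ s)) rest).2 := by
  rw [cluster_overlapping_strings.eq_def]

-- A's inner loop is a partition of the remaining list by the overlap test
theorem clusterInner_eq (ov : PySem.Set String) (l : List String) :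
    clusterInner ov l =
      (l.filter (fun s => (PySem.Str.split₀ s).any (fun w => PySem.Set.contains ov w)),
       l.filter (fun s => !(PySem.Str.split₀ s).any (fun w => PySem.Set.contains ov w))) := by
  induction l with
  | nil => simp [clusterInner]
  | cons s rest ih =>
    simp only [clusterInner, ih, List.filter_cons]
    cases h : (PySem.Str.split₀ s).any (fun w => PySem.Set.contains ov w) with
    | true => simp
    | false => simp

-- one item's contribution to the inverted index
theorem buildIndexInner_getD (i : Int) : ∀ (ws : List String)
    (d : PySem.Dict String (List Int)) (w : String), ws.Nodup →
    (buildIndexInner i ws d).getD w [] =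
      d.getD w [] ++ (if w ∈ ws then [i] else []) := by
  intro ws
  induction ws with
  | nil => intro d w _; simp [buildIndexInner]
  | cons w' t ih =>
    intro d w hnd
    simp only [List.nodup_cons] at hnd
    simp only [buildIndexInner, List.foldl_cons] at ih ⊢
    rw [ih _ w hnd.2]
    by_cases h : w = w'
    · subst h
      simp [PySem.Dict.getD_insert_self, hnd.1]
    · rw [PySem.Dict.getD_insert_of_ne _ _ _ h]
      simp [h]

-- the whole building fold: index lookup and items list, over any start state
theorem buildB_fold (l : List (Int × String)) (d : PySem.Dict String (List Int))
    (acc : List (Int × String × PySem.Set String)) :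
    (∀ w, (l.foldl (fun st p =>
        let ws := PySem.Set.ofList (PySem.Str.split₀ p.2)
        (buildIndexInner p.1 ws st.1, st.2 ++ [(p.1, p.2, ws)])) (d, acc)).1.getD w [] =
      d.getD w [] ++ ((l.filter (fun p => decide (w ∈ PySem.Str.split₀ p.2))).map Prod.fst))
    ∧ (l.foldl (fun st p =>
        let ws := PySem.Set.ofList (PySem.Str.split₀ p.2)
        (buildIndexInner p.1 ws st.1, st.2 ++ [(p.1, p.2, ws)])) (d, acc)).2 =
      acc ++ l.map (fun p => (p.1, p.2, PySem.Set.ofList (PySem.Str.split₀ p.2))) := by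
  induction l generalizing d acc with
  | nil => simp
  | cons p t ih =>
    simp only [List.foldl_cons, List.filter_cons, List.map_cons]
    obtain ⟨ih1, ih2⟩ := ih (buildIndexInner p.1 (PySem.Set.ofList (PySem.Str.split₀ p.2)) d)
      (acc ++ [(p.1, p.2, PySem.Set.ofList (PySem.Str.split₀ p.2))])
    constructor
    · intro w
      rw [ih1 w, buildIndexInner_getD _ _ _ _ (PySem.Set.nodup_ofList _)]
      by_cases h : w ∈ PySem.Str.split₀ p.2
      · simp [h, PySem.Set.mem_ofList]
      · simp [h, PySem.Set.mem_ofList]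
    · rw [ih2]; simp

-- enumerate yields indices ≥ the start value
theorem enumerate_fst_ge (l : List String) : ∀ (n : Int) (x : Int × String),
    x ∈ PySem.List.enumerate l n → n ≤ x.1 := by
  induction l with
  | nil => intro n x hx; rw [PySem.List.enumerate] at hx; simp at hx
  | cons s t ih =>
    intro n x hx
    rw [PySem.List.enumerate] at hx
    rcases List.mem_cons.mp hx with hx | hx
    · simp [hx]
    · have := ih (n + 1) x hx; omega

-- the index component determines the string component in enumerate
theorem enumerate_inj (l : List String) : ∀ (n : Int) (j : Int) (s t : String),
    (j, s) ∈ PySem.List.enumerate l n → (j, t) ∈ PySem.List.enumerate l n → s = t := by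
  induction l with
  | nil => intro n j s t hs _; rw [PySem.List.enumerate] at hs; simp at hs
  | cons a tl ih =>
    intro n j s t hs ht
    rw [PySem.List.enumerate] at hs ht
    rcases List.mem_cons.mp hs with hs | hs <;> rcases List.mem_cons.mp ht with ht | ht
    · rw [Prod.mk.injEq] at hs ht
      rw [hs.2, ht.2]
    · exfalso
      have h1 : j = n := (Prod.mk.injEq .. ▸ hs : _ ∧ _).1
      have := enumerate_fst_ge tl (n + 1) _ ht; simp at this; omega
    · exfalso
      have h1 : j = n := (Prod.mk.injEq .. ▸ ht : _ ∧ _).1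
      have := enumerate_fst_ge tl (n + 1) _ hs; simp at this; omega
    · exact ih (n + 1) j s t hs ht

-- membership in the gathered matched set
theorem mem_gatherMatched (idx : PySem.Dict String (List Int)) (ws : PySem.Set String) (j : Int) :
    j ∈ gatherMatched idx ws ↔ ∃ w ∈ ws, j ∈ idx.getD w [] := by
  have key : ∀ (l : List String) (m : PySem.Set Int),
      j ∈ l.foldl (fun m w => PySem.Set.update m (idx.getD w [])) m ↔
        j ∈ m ∨ ∃ w ∈ l, j ∈ idx.getD w [] := by
    intro l
    induction l with
    | nil => simp
    | cons w t ih =>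
      intro m
      simp only [List.foldl_cons, ih, PySem.Set.mem_update]
      constructor
      · rintro ((h | h) | ⟨w', hw', h⟩)
        · exact Or.inl h
        · exact Or.inr ⟨w, by simp, h⟩
        · exact Or.inr ⟨w', by simp [hw'], h⟩
      · rintro (h | ⟨w', hw', h⟩)
        · exact Or.inl (Or.inl h)
        · rcases List.mem_cons.mp hw' with rfl | hw'
          · exact Or.inl (Or.inr h)
          · exact Or.inr ⟨w', hw', h⟩
  rw [gatherMatched, key]
  simp [PySem.Set.empty]

-- main loop equivalence: under the two invariants, B's index-driven loop computes exactly
-- A's repeated seed-and-partition on the carried strings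
theorem clusterLoop_eq (idx : PySem.Dict String (List Int)) :
    ∀ (n : Nat) (rem : List (Int × String × PySem.Set String)), rem.length ≤ n →
    (∀ x ∈ rem, x.2.2 = PySem.Set.ofList (PySem.Str.split₀ x.2.1)) →
    (∀ x ∈ rem, ∀ w, x.1 ∈ idx.getD w [] ↔ w ∈ PySem.Str.split₀ x.2.1) →
    clusterLoop idx rem = cluster_overlapping_strings (rem.map (fun x => x.2.1)) := by
  intro n
  induction n with
  | zero =>
    intro rem hlen _ _
    have : rem = [] := List.length_eq_zero_iff.mp (Nat.le_zero.mp hlen)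
    subst this
    simp only [List.map_nil, A_nil]
    rw [clusterLoop]
  | succ n ih =>
    intro rem hlen h1 h2
    match rem with
    | [] => simp only [List.map_nil, A_nil]; rw [clusterLoop]
    | (i, s, ws) :: rest =>
      have hws : ws = PySem.Set.ofList (PySem.Str.split₀ s) := h1 (i, s, ws) (by simp)
      -- the matched-set test agrees with A's word-overlap test on every remaining item
      have hq : ∀ t ∈ rest,
          PySem.Set.contains (gatherMatched idx ws) t.1 =
            (PySem.Str.split₀ t.2.1).any
              (fun w => PySem.Set.contains (PySem.Set.ofList (PySem.Str.split₀ s)) w) := by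
        intro t ht
        refine Bool.eq_iff_iff.mpr ?_
        rw [PySem.Set.contains_iff, mem_gatherMatched]
        simp only [List.any_eq_true, PySem.Set.contains_iff, PySem.Set.mem_ofList]
        constructor
        · rintro ⟨w, hw, hj⟩
          exact ⟨w, (h2 t (by simp [ht]) w).mp hj, by
            rw [hws] at hw
            exact (PySem.Set.mem_ofList _ _).mp hw⟩
        · rintro ⟨w, hw1, hw2⟩
          exact ⟨w, by rw [hws]; exact (PySem.Set.mem_ofList _ _).mpr hw2,
            (h2 t (by simp [ht]) w).mpr hw1⟩
      rw [clusterLoop]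
      simp only [List.map_cons]
      rw [A_cons]
      have hfilter1 :
          (rest.filter (fun t => PySem.Set.contains (gatherMatched idx ws) t.1)).map
              (fun t => t.2.1) =
            (rest.map (fun x => x.2.1)).filter
              (fun u => (PySem.Str.split₀ u).any
                (fun w => PySem.Set.contains (PySem.Set.ofList (PySem.Str.split₀ s)) w)) := by
        rw [List.filter_map]
        congr 1
        apply List.filter_congr
        intro x hx
        simpa [Function.comp] using hq x hx
      have hfilter2 :
          (rest.filter (fun t => !PySem.Set.contains (gatherMatched idx ws) t.1)).map
              (fun t => t.2.1) =
            (rest.map (fun x => x.2.1)).filter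
              (fun u => !(PySem.Str.split₀ u).any
                (fun w => PySem.Set.contains (PySem.Set.ofList (PySem.Str.split₀ s)) w)) := by
        rw [List.filter_map]
        congr 1
        apply List.filter_congr
        intro x hx
        simp only [Function.comp_apply]
        rw [hq x hx]
      rw [clusterInner_eq]
      simp only [← hfilter1, ← hfilter2]
      have hlen' : (rest.filter (fun t => !PySem.Set.contains (gatherMatched idx ws) t.1)).length ≤ n := by
        have := List.length_filter_le (fun t : Int × String × PySem.Set String =>
          !PySem.Set.contains (gatherMatched idx ws) t.1) rest
        simp at hlen; omega
      rw [ih _ hlen'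
        (fun x hx => h1 x (by simp [List.mem_of_mem_filter hx]))
        (fun x hx => h2 x (by simp [List.mem_of_mem_filter hx]))]

-- the built items list carries the original strings and satisfies both invariants
theorem buildB_spec (string_list : List String) :
    ((buildB string_list).2.map (fun x => x.2.1) = string_list)
    ∧ (∀ x ∈ (buildB string_list).2, x.2.2 = PySem.Set.ofList (PySem.Str.split₀ x.2.1))
    ∧ (∀ x ∈ (buildB string_list).2, ∀ w,
        x.1 ∈ (buildB string_list).1.getD w [] ↔ w ∈ PySem.Str.split₀ x.2.1) := by
  obtain ⟨hidx, hitems⟩ := buildB_fold (PySem.List.enumerate string_list) PySem.Dict.empty []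
  rw [buildB]
  rw [hitems]
  simp only [List.nil_append]
  refine ⟨?_, ?_, ?_⟩
  · rw [List.map_map]
    have : ∀ (l : List String) (n : Int),
        (PySem.List.enumerate l n).map (fun p => p.2) = l := by
      intro l
      induction l with
      | nil => intro n; simp [PySem.List.enumerate]
      | cons a t iht => intro n; rw [PySem.List.enumerate]; simp [iht]
    exact this string_list 0
  · intro x hx
    simp only [List.mem_map] at hx
    obtain ⟨p, _, rfl⟩ := hx
    rfl
  · intro x hx w
    simp only [List.mem_map] at hx
    obtain ⟨p, hp, rfl⟩ := hx
    rw [hidx w]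
    simp only [PySem.Dict.getD_empty, List.nil_append, List.mem_map, List.mem_filter]
    constructor
    · rintro ⟨p', ⟨hp', hw⟩, hfst⟩
      simp only [decide_eq_true_eq] at hw
      have : p'.2 = p.2 := by
        have : p' = (p'.1, p'.2) := rfl
        have h2 : p = (p.1, p.2) := rfl
        exact enumerate_inj string_list 0 p.1 p'.2 p.2 (by rw [← hfst]; simpa using hp')
          (by simpa using hp)
      rw [← this]; exact hw
    · intro hw
      exact ⟨p, ⟨hp, by simpa using hw⟩, rfl⟩

-- ===== VERDICT (by name: the statement is the Claim_ definition above) =====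
theorem cluster_overlapping_strings_spec : Claim_equal_cluster_overlapping_strings := by
  intro string_list _
  unfold Spec_cluster_overlapping_strings
  obtain ⟨hmap, h1, h2⟩ := buildB_spec string_list
  rw [cluster_overlapping_strings_alt]
  rw [clusterLoop_eq (buildB string_list).1 (buildB string_list).2.length
    (buildB string_list).2 le_rfl h1 h2, hmap]
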